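-- pv_equiv track=rewrite | github.com/DeepLatte/coding_test | heap-2.py | solution
-- ===== SOURCE A (Python) =====
-- def solution(stock, dates, supplies, k): # 테스트 케이스에서 런타임에러 발생
--     answer = 0
--     while 1:
--         if stock >= k:
--             return answer
--         temp_list = []
--         i = 0
--         while len(dates) != i:
--             if dates[i] <= stock:
--                 temp_list.append(dates[i])
--                 i += 1
--             else:
--                 break
--         temp_sup = supplies[:int(len(temp_list))]
--         stock += max(temp_sup)
--         idx = supplies.index(max(temp_sup))
--         supplies = supplies[idx+1:]
--         dates = dates[idx+1:]
--         answer += 1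
--
--     return answer
-- ===== SOURCE B (Python) =====
-- def solution(stock, dates, supplies, k):
--     # One shared base index into the unmodified lists replaces A's per-round
--     # temp-list build, double max() and re-slicing of both supplies and dates.
--     answer = 0
--     base = 0
--     while stock < k:
--         m = base
--         while m < len(dates) and dates[m] <= stock:
--             m += 1
--         lim = min(m, len(supplies))
--         # first argmax of the reachable window; empty window raises ValueError like A
--         best = max(range(base, lim), key=lambda j: supplies[j])
--         stock += supplies[best]
--         base = best + 1
--         answer += 1
--     return answer
-- ===== Notes on version B (the rewrite author's own statement) =====
-- stated objective: alternative
-- what changed: B replaces A's per-round list rebuilding (building a temp prefix list, slicing temp_sup, computing max twice, and re-slicing both supplies and dates after every delivery) with a single shared base index into the unmodified lists and one first-argmax pass over the reachable window; Pre_ excludes exactly the inputs where A raises ValueError (no reachable supply while stock < k), on which B raises ValueError too.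
import Mathlib
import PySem

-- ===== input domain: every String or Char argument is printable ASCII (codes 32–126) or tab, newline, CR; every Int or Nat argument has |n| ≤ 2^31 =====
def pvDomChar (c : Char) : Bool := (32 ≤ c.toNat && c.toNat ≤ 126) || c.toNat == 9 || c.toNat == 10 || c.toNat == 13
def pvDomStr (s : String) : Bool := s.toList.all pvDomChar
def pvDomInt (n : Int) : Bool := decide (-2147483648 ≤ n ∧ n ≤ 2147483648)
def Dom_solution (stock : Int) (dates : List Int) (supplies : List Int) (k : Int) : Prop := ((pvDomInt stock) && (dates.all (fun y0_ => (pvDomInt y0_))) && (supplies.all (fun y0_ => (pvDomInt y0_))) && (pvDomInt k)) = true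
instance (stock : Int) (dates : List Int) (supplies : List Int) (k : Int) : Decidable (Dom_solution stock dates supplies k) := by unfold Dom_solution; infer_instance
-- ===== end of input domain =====

-- B replaces A's per-round list rebuilding (temp prefix list, double max(), re-slicing both
-- supplies and dates every delivery) with one shared base index into the unmodified lists and a
-- single first-argmax pass over the reachable window; objective: alternative (same results).
-- The fuel argument of each loop is a pure totality guard: every round consumes at least one
-- supply, so length supplies + 1 rounds always suffice before the loop ends or Python raises.

-- ===== PORT A =====
-- A's inner 'while len(dates) != i: if dates[i] <= stock: temp_list.append(...) else: break'
def pvTakeLe (stock : Int) : List Int → List Int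
  | [] => []
  | d :: rest => if d ≤ stock then d :: pvTakeLe stock rest else []

-- A's outer 'while 1' loop; where Python raises ValueError (max() of empty temp_sup) the port
-- returns the accumulator — exactly those inputs are excluded by Pre_solution.
def pvLoopA : Nat → Int → List Int → List Int → Int → Int → Int
  | 0, _, _, _, _, answer => answer
  | fuel + 1, stock, dates, supplies, k, answer =>
    if k ≤ stock then answer
    else
      match PySem.List.max? (supplies.take (pvTakeLe stock dates).length) (fun x => x) with
      | none => answer          -- Python: ValueError; outside Pre_solution
      | some mx =>
        match PySem.List.index? supplies mx with
        | none => answer        -- unreachable: mx ∈ supplies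
        | some idx =>
          pvLoopA fuel (stock + mx) (dates.drop (idx + 1)) (supplies.drop (idx + 1)) k (answer + 1)

def solution (stock : Int) (dates : List Int) (supplies : List Int) (k : Int) : Int :=
  pvLoopA (supplies.length + 1) stock dates supplies k 0

-- ===== PORT B =====
-- B's 'while m < len(dates) and dates[m] <= stock: m += 1'
def pvCount (dates : List Int) (stock : Int) (m : Nat) : Nat :=
  if m < dates.length then
    if dates.getD m 0 ≤ stock then pvCount dates stock (m + 1) else m
  else m
termination_by dates.length - m

-- B's 'max(range(base, lim), key=lambda j: supplies[j])' — running first-argmax scan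
def pvMaxBy (supplies : List Int) (best : Nat) : List Nat → Nat
  | [] => best
  | j :: rest =>
      pvMaxBy supplies (if supplies.getD best 0 < supplies.getD j 0 then j else best) rest

-- B's 'while stock < k' loop over the shared base index; where Python raises ValueError
-- (max() of an empty range) the port returns the accumulator — outside Pre_solution.
def pvLoopB (dates supplies : List Int) (k : Int) : Nat → Int → Nat → Int → Int
  | 0, _, _, answer => answer
  | fuel + 1, stock, base, answer =>
    if stock < k then
      let lim := min (pvCount dates stock base) supplies.length
      match List.range' base (lim - base) with
      | [] => answer            -- Python: ValueError; outside Pre_solution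
      | j :: rest =>
        let best := pvMaxBy supplies j rest
        pvLoopB dates supplies k fuel (stock + supplies.getD best 0) (best + 1) (answer + 1)
    else answer

def solution_alt (stock : Int) (dates : List Int) (supplies : List Int) (k : Int) : Int :=
  pvLoopB dates supplies k (supplies.length + 1) stock 0 0

-- ===== PRECONDITION & SPEC =====
-- helpers of Pre_solution only (independent of both ports): first argmax of a list, prefix count
def pvPrefLe (stock : Int) : List Int → Nat
  | [] => 0
  | d :: rest => if d ≤ stock then pvPrefLe stock rest + 1 else 0

def pvArgBest : List Int → Option (Nat × Int)
  | [] => none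
  | s :: rest =>
    match pvArgBest rest with
    | none => some (0, s)
    | some (i, v) => if s < v then some (i + 1, v) else some (0, s)

-- Pre_solution excludes exactly the inputs on which Python A raises (ValueError: no supply is
-- reachable while stock is still below k) — and on which B raises too; it admits every input on
-- which A returns. Whether such a raise ever happens depends on which supplies the greedy run
-- consumes, so no static bound or shape condition can express this set; the condition therefore
-- replays the delivery rounds (at most len(supplies)+1 Option-valued state updates, none = raise)
-- independently of both ports. The equivalence proof itself does not need Pre_solution: the two
-- ports agree on every input, Pre_ only marks where that common value is what Python returns.
def pvRound (dates supplies : List Int) (k : Int) : Option (Int × Nat) → Option (Int × Nat)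
  | none => none
  | some (stock, base) =>
    if k ≤ stock then some (stock, base)
    else
      match pvArgBest ((supplies.drop base).take (pvPrefLe stock (dates.drop base))) with
      | none => none
      | some (i, v) => some (stock + v, base + i + 1)

def pvFeasible (stock : Int) (dates supplies : List Int) (k : Int) : Bool :=
  (((List.range (supplies.length + 1)).foldl (fun s _ => pvRound dates supplies k s)
      (some (stock, 0))).map (fun st => decide (k ≤ st.1))).getD false

def Pre_solution (stock : Int) (dates : List Int) (supplies : List Int) (k : Int) : Prop :=
  pvFeasible stock dates supplies k = true
instance (stock : Int) (dates : List Int) (supplies : List Int) (k : Int) : Decidable (Pre_solution stock dates supplies k) := by unfold Pre_solution; infer_instance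

def pvWitness_solution : Int × List Int × List Int × Int := (0, [0, 0, 1], [1, 2, 5], 7)

def Spec_solution (stock : Int) (dates : List Int) (supplies : List Int) (k : Int) (out : Int) : Prop := out = solution_alt stock dates supplies k
instance (stock : Int) (dates : List Int) (supplies : List Int) (k : Int) (out : Int) : Decidable (Spec_solution stock dates supplies k out) := by unfold Spec_solution; infer_instance

-- ===== CLAIM (what is proved, stated in full; the proofs are below) =====
def Claim_equal_solution : Prop := ∀ (stock : Int) (dates : List Int) (supplies : List Int) (k : Int), Dom_solution stock dates supplies k → Pre_solution stock dates supplies k → Spec_solution stock dates supplies k (solution stock dates supplies k)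

-- ===== LEMMAS AND PROOFS =====

-- B's date scan counts exactly the length of A's reachable prefix temp_list
theorem count_eq (dates : List Int) (stock : Int) :
    ∀ (n base : Nat), dates.length - base ≤ n →
      pvCount dates stock base = base + (pvTakeLe stock (dates.drop base)).length := by
  intro n
  induction n with
  | zero =>
    intro base h
    have hb : dates.length ≤ base := by omega
    rw [pvCount, if_neg (by omega), List.drop_eq_nil_of_le hb]
    simp [pvTakeLe]
  | succ n ih =>
    intro base h
    by_cases hb : base < dates.length
    · have hdrop : dates.drop base = dates[base] :: dates.drop (base + 1) :=
        (List.getElem_cons_drop hb).symm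
      rw [pvCount, if_pos hb, List.getD_eq_getElem dates 0 hb, hdrop]
      by_cases hle : dates[base] ≤ stock
      · rw [if_pos hle, ih (base + 1) (by omega)]
        simp [pvTakeLe, if_pos hle]; omega
      · rw [if_neg hle]
        simp [pvTakeLe, if_neg hle]
    · rw [pvCount, if_neg hb, List.drop_eq_nil_of_le (by omega)]
      simp [pvTakeLe]

-- invariant of B's running first-argmax scan over range' j n, relative to a window start
theorem maxBy_spec (supplies : List Int) (base : Nat) :
    ∀ (n j b : Nat), base ≤ b → b < j →
      (∀ t, base ≤ t → t < j → supplies.getD t 0 ≤ supplies.getD b 0) →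
      (∀ t, base ≤ t → t < b → supplies.getD t 0 < supplies.getD b 0) →
      (base ≤ pvMaxBy supplies b (List.range' j n) ∧
       pvMaxBy supplies b (List.range' j n) < j + n ∧
       (∀ t, base ≤ t → t < j + n → supplies.getD t 0 ≤ supplies.getD (pvMaxBy supplies b (List.range' j n)) 0) ∧
       (∀ t, base ≤ t → t < pvMaxBy supplies b (List.range' j n) → supplies.getD t 0 < supplies.getD (pvMaxBy supplies b (List.range' j n)) 0)) := by
  intro n
  induction n with
  | zero =>
    intro j b hbb hbj hmax hstrict
    simp only [List.range'_zero, pvMaxBy]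
    exact ⟨hbb, by omega, fun t ht1 ht2 => hmax t ht1 (by omega), hstrict⟩
  | succ n ih =>
    intro j b hbb hbj hmax hstrict
    rw [List.range'_succ]
    simp only [pvMaxBy]
    by_cases hcmp : supplies.getD b 0 < supplies.getD j 0
    · rw [if_pos hcmp]
      have := ih (j + 1) j (by omega) (by omega)
        (fun t ht1 ht2 => by
          by_cases htj : t = j
          · subst htj; exact le_refl _
          · exact le_of_lt (lt_of_le_of_lt (hmax t ht1 (by omega)) hcmp))
        (fun t ht1 ht2 => lt_of_le_of_lt (hmax t ht1 ht2) hcmp)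
      exact ⟨this.1, by omega, fun t ht1 ht2 => this.2.2.1 t ht1 (by omega), this.2.2.2⟩
    · rw [if_neg hcmp]
      have := ih (j + 1) b hbb (by omega)
        (fun t ht1 ht2 => by
          by_cases htj : t = j
          · subst htj; omega
          · exact hmax t ht1 (by omega))
        hstrict
      exact ⟨this.1, by omega, fun t ht1 ht2 => this.2.2.1 t ht1 (by omega), this.2.2.2⟩

-- the two loops agree round for round, B's base pointing where A's slices start
theorem loop_eq (dates supplies : List Int) (k : Int) :
    ∀ (fuel : Nat) (stock : Int) (base : Nat) (answer : Int), base ≤ supplies.length →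
      pvLoopA fuel stock (dates.drop base) (supplies.drop base) k answer
        = pvLoopB dates supplies k fuel stock base answer := by
  intro fuel
  induction fuel with
  | zero => intro stock base answer _; rfl
  | succ fuel ih =>
    intro stock base answer hbase
    by_cases hk : k ≤ stock
    · simp only [pvLoopA, pvLoopB]
      rw [if_pos hk, if_neg (not_lt.mpr hk)]
    · simp only [pvLoopA, pvLoopB]
      rw [if_neg hk, if_pos (lt_of_not_ge hk)]
      have hcnt : pvCount dates stock base = base + (pvTakeLe stock (dates.drop base)).length :=
        count_eq dates stock (dates.length - base) base (le_refl _)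
      set w := (pvTakeLe stock (dates.drop base)).length with hw
      set T := (supplies.drop base).take w with hT
      have hTlen : T.length = min w (supplies.length - base) := by
        simp [hT, List.length_take, List.length_drop]
      have hlim : min (pvCount dates stock base) supplies.length = base + T.length := by
        rw [hcnt]; omega
      rw [hlim]
      by_cases hTnil : T = []
      · -- empty window: A's max() and B's max() both raise; both ports return the accumulator
        rw [hTnil]
        have : PySem.List.max? T (fun x => x) = none :=
          (PySem.List.max?_eq_none_iff T (fun x => x)).mpr hTnil
        rw [hTnil] at this
        rw [this]
        simp
      · have hTpos : 0 < T.length := List.length_pos_iff.mpr hTnil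
        obtain ⟨v, hv⟩ : ∃ v, PySem.List.max? T (fun x => x) = some v := by
          cases hmx : PySem.List.max? T (fun x => x) with
          | none => exact absurd ((PySem.List.max?_eq_none_iff T (fun x => x)).mp hmx) hTnil
          | some v => exact ⟨v, rfl⟩
        have hvT : v ∈ T := PySem.List.max?_mem hv
        have hvmax : ∀ y ∈ T, y ≤ v := fun y hy => PySem.List.max?_isMax hv y hy
        have hvS : v ∈ supplies.drop base := List.mem_of_mem_take hvT
        obtain ⟨idx, hidx⟩ : ∃ idx, PySem.List.index? (supplies.drop base) v = some idx := by
          cases hi : PySem.List.index? (supplies.drop base) v with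
          | none => exact absurd hvS (by
              have := (PySem.List.index?_eq_none_iff (supplies.drop base) v).mp hi
              exact fun h => this h)
          | some idx => exact ⟨idx, rfl⟩
        obtain ⟨hidxlt, hval, hfirst⟩ := PySem.List.getElem_of_index?_eq_some hidx
        -- idx lies inside the window T
        have hidxT : idx < T.length := by
          by_contra hge
          obtain ⟨t, htlt, htv⟩ := List.getElem_of_mem hvT
          have htS : (supplies.drop base)[t]'(by
              have := List.length_take_le w (supplies.drop base); omega) = v := by
            rw [← htv]; exact (List.getElem_take).symm ▸ rfl
          exact hfirst t (by omega) htS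
        -- key facts about absolute positions
        have hkey : ∀ (t : Nat) (ht : t < T.length),
            supplies.getD (base + t) 0 = T[t]'ht := by
          intro t ht
          have hts : t < supplies.length - base := by rw [hTlen] at ht; omega
          rw [List.getD_eq_getElem supplies 0 (show base + t < supplies.length by omega)]
          have h2 : T[t]'ht = (supplies.drop base)[t]'(by simp [List.length_drop]; omega) :=
            List.getElem_take
          rw [h2, List.getElem_drop]
        -- A's pick satisfies the window first-argmax spec at absolute index base + idx
        have hA1 : supplies.getD (base + idx) 0 = v := by
          rw [hkey idx hidxT]
          have : T[idx]'hidxT = (supplies.drop base)[idx]'hidxlt := List.getElem_take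
          rw [this, hval]
        have hA2 : ∀ t, base ≤ t → t < base + T.length →
            supplies.getD t 0 ≤ supplies.getD (base + idx) 0 := by
          intro t ht1 ht2
          have h := hkey (t - base) (by omega)
          rw [show base + (t - base) = t by omega] at h
          rw [hA1, h]
          exact hvmax _ (List.getElem_mem _)
        have hA3 : ∀ t, base ≤ t → t < base + idx →
            supplies.getD t 0 < supplies.getD (base + idx) 0 := by
          intro t ht1 ht2
          have h := hkey (t - base) (by omega)
          rw [show base + (t - base) = t by omega] at h
          rw [hA1, h]
          have hne : T[t - base]'(by omega) ≠ v := by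
            have heq : T[t - base]'(by omega) = (supplies.drop base)[t - base]'(by omega) :=
              List.getElem_take
            rw [heq]
            exact hfirst (t - base) (by omega)
          exact lt_of_le_of_ne (hvmax _ (List.getElem_mem _)) hne
        -- B's scan returns the same absolute index
        obtain ⟨n, hn⟩ : ∃ n, T.length = n + 1 := ⟨T.length - 1, by omega⟩
        have hrange : List.range' base T.length = base :: List.range' (base + 1) n := by
          rw [hn, List.range'_succ]
        rw [show base + T.length - base = T.length by omega, hrange]
        have hscan := maxBy_spec supplies base n (base + 1) base (le_refl _)
          (by omega) (fun t ht1 ht2 => by rw [show t = base by omega])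
          (fun t ht1 ht2 => by omega)
        set r := pvMaxBy supplies base (List.range' (base + 1) n) with hr
        obtain ⟨hr1, hr2, hr3, hr4⟩ := hscan
        have hreq : r = base + idx := by
          by_contra hne
          rcases Nat.lt_or_ge r (base + idx) with hlt | hge
          · have h1 := hA3 r hr1 hlt
            have h2 := hr3 (base + idx) (by omega) (by omega)
            omega
          · have hgt : base + idx < r := by omega
            have h1 := hr4 (base + idx) (by omega) hgt
            have h2 := hA2 r hr1 (by omega)
            omega
        simp only [hv, hidx, ← hr, hreq, hA1]
        rw [List.drop_drop, List.drop_drop]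
        exact ih (stock + v) (base + idx + 1) (answer + 1) (by omega)

-- ===== VERDICT (by name: the statement is the Claim_ definition above) =====
theorem solution_spec : Claim_equal_solution := by
  intro stock dates supplies k _ _
  unfold Spec_solution solution solution_alt
  simpa using loop_eq dates supplies k (supplies.length + 1) stock 0 0 (Nat.zero_le _)
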